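-- pv_equiv track=rewrite | github.com/kebonix/KawanCipher | kawan_cipher.py | decifrar
-- ===== SOURCE A (Python) =====
-- letras = {
--   "A":"N",
--   "B":"O",
--   "C":"P",
--   "D":"Q",
--   "E":"R",
--   "F":"S",
--   "G":"T",
--   "H":"U",
--   "I":"V",
--   "J":"W",
--   "K":"X",
--   "L":"Y",
--   "M":"Z",
--   "N":"A",
--   "O":"B",
--   "P":"C",
--   "Q":"D",
--   "R":"E",
--   "S":"F",
--   "T":"G",
--   "U":"H",
--   "V":"I",
--   "W":"J",
--   "X":"K",
--   "Y":"L",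
--   "Z":"M",
-- }
--
-- def decifrar(mensagem):
--   texto_decifrado = ""
--   for letra in mensagem:
--     achei = False
--     for chave,valor in letras.items():
--         if letra.upper() == valor:
--           texto_decifrado += chave
--           achei = True
--     if not achei:
--       texto_decifrado += letra
--   return texto_decifrado
-- ===== SOURCE B (Python) =====
-- def decifrar(mensagem):
--   out = []
--   for letra in mensagem:
--     u = letra.upper()
--     if len(u) == 1 and 'A' <= u <= 'Z':
--       out.append(chr((ord(u) - ord('A') + 13) % 26 + ord('A')))
--     else:
--       out.append(letra)
--   return ''.join(out)
-- ===== Notes on version B (the rewrite author's own statement) =====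
-- stated objective: faster
-- what changed: Replaced the 26-entry substitution-table scan per character with closed-form ROT13 arithmetic on the uppercased character code, accumulating output pieces in a list joined once instead of repeated string concatenation.
import Mathlib
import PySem

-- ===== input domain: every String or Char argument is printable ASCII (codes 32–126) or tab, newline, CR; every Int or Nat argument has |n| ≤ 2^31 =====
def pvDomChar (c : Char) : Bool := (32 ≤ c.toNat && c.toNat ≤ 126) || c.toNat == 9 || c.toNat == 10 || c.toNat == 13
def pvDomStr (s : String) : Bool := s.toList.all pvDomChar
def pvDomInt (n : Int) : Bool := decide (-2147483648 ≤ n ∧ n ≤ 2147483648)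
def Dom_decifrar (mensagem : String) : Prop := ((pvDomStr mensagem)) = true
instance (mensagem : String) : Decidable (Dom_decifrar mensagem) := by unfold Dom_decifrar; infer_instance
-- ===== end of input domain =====

-- B replaces A's per-character scan of the 26-entry table by closed-form ROT13 arithmetic (objective: faster, measured).
-- ===== PORT A =====
-- the module-level dict `letras` (single-char keys/values, so Char × Char)
def letrasA : List (Char × Char) :=
  [('A','N'), ('B','O'), ('C','P'), ('D','Q'), ('E','R'), ('F','S'), ('G','T'), ('H','U'),
   ('I','V'), ('J','W'), ('K','X'), ('L','Y'), ('M','Z'), ('N','A'), ('O','B'), ('P','C'),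
   ('Q','D'), ('R','E'), ('S','F'), ('T','G'), ('U','H'), ('V','I'), ('W','J'), ('X','K'),
   ('Y','L'), ('Z','M')]

-- A's inner loop over letras.items(): append chave on each match, track achei
def decifrarInner (letra : Char) (acc : List Char) : List Char × Bool :=
  letrasA.foldl
    (fun (st : List Char × Bool) kv =>
      if PySem.Chars.upperChar letra == kv.2 then (st.1 ++ [kv.1], true) else st)
    (acc, false)

-- A's per-character body
def decifrarStep (acc : List Char) (letra : Char) : List Char :=
  if (decifrarInner letra acc).2 then (decifrarInner letra acc).1
  else (decifrarInner letra acc).1 ++ [letra]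

def decifrar (mensagem : String) : String :=
  String.ofList (mensagem.toList.foldl decifrarStep [])

-- ===== PORT B =====
def rot13Char (letra : Char) : Char :=
  let u := PySem.Chars.upperChar letra
  if 'A' ≤ u ∧ u ≤ 'Z' then Char.ofNat ((u.toNat - 65 + 13) % 26 + 65) else letra

def decifrar_alt (mensagem : String) : String :=
  String.ofList (mensagem.toList.map rot13Char)

-- ===== PRECONDITION & SPEC =====
def Spec_decifrar (mensagem : String) (out : String) : Prop := out = decifrar_alt mensagem
instance (mensagem : String) (out : String) : Decidable (Spec_decifrar mensagem out) := by unfold Spec_decifrar; infer_instance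

-- ===== CLAIM (what is proved, stated in full; the proofs are below) =====
def Claim_equal_decifrar : Prop := ∀ (mensagem : String), Dom_decifrar mensagem → Spec_decifrar mensagem (decifrar mensagem)

-- ===== LEMMAS AND PROOFS =====

-- the inner scan's fold only ever appends to the running accumulator
theorem innerFold_shift (letra : Char) (l : List (Char × Char)) :
    ∀ (acc : List Char) (b : Bool),
      l.foldl
        (fun (st : List Char × Bool) kv =>
          if PySem.Chars.upperChar letra == kv.2 then (st.1 ++ [kv.1], true) else st)
        (acc, b)
      = (acc ++ (l.foldl
          (fun (st : List Char × Bool) kv =>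
            if PySem.Chars.upperChar letra == kv.2 then (st.1 ++ [kv.1], true) else st)
          ([], b)).1,
         (l.foldl
          (fun (st : List Char × Bool) kv =>
            if PySem.Chars.upperChar letra == kv.2 then (st.1 ++ [kv.1], true) else st)
          ([], b)).2) := by
  induction l with
  | nil => intro acc b; simp
  | cons kv t ih =>
    intro acc b
    simp only [List.foldl_cons]
    by_cases h : (PySem.Chars.upperChar letra == kv.2) = true
    · simp only [h, if_pos]
      rw [ih (acc ++ [kv.1]) true, ih ([] ++ [kv.1]) true]
      simp
    · simp only [h, Bool.false_eq_true, if_false]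
      exact ih acc b

theorem decifrarStep_append (acc : List Char) (letra : Char) :
    decifrarStep acc letra = acc ++ decifrarStep [] letra := by
  unfold decifrarStep decifrarInner
  rw [innerFold_shift letra letrasA acc false]
  split_ifs <;> simp

-- per-character agreement on the ASCII domain, checked exhaustively (via toNat codes, which the kernel evaluates fast)
set_option maxRecDepth 8192 in
theorem step_eq_rot13_aux :
    ((List.range 127).all (fun n =>
      ((decifrarStep [] (Char.ofNat n)).map Char.toNat) == [(rot13Char (Char.ofNat n)).toNat])) = true := by
  decide

theorem char_toNat_injective : Function.Injective Char.toNat := by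
  intro a b hab
  exact Char.ext (UInt32.toNat_inj.mp hab)

theorem step_eq_rot13 (c : Char) (h : pvDomChar c = true) :
    decifrarStep [] c = [rot13Char c] := by
  have hlt : c.toNat < 127 := by
    simp only [pvDomChar, Bool.or_eq_true, Bool.and_eq_true, decide_eq_true_eq,
      beq_iff_eq] at h
    omega
  have hall := List.all_eq_true.mp step_eq_rot13_aux c.toNat (List.mem_range.mpr hlt)
  rw [Char.ofNat_toNat] at hall
  have hmap : (decifrarStep [] c).map Char.toNat = [rot13Char c].map Char.toNat := by
    simpa using eq_of_beq hall
  exact (List.map_injective_iff.mpr char_toNat_injective) hmap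

theorem foldl_eq_map (l : List Char) (h : l.all pvDomChar = true) (acc : List Char) :
    l.foldl decifrarStep acc = acc ++ l.map rot13Char := by
  induction l generalizing acc with
  | nil => simp
  | cons c t ih =>
    simp only [List.all_cons, Bool.and_eq_true] at h
    simp only [List.foldl_cons, List.map_cons]
    rw [ih h.2, decifrarStep_append, step_eq_rot13 c h.1]
    simp

-- ===== VERDICT (by name: the statement is the Claim_ definition above) =====
theorem decifrar_spec : Claim_equal_decifrar := by
  intro m hdom
  unfold Spec_decifrar decifrar decifrar_alt
  rw [foldl_eq_map m.toList hdom []]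
  simp
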